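-- pv_equiv track=rewrite | github.com/Nymphfern/pr | PR-3/maint.py | redactor
-- ===== SOURCE A (Python) =====
-- def redactor(text):
--     # Функция, которая приводит строку к определенному формату
--     while ((len(text) % 8) != 0):
--         text += "#"  # Добавляем символ "#" до тех пор, пока длина строки не станет кратной 8
--
--     output = ['\0', '\0', '\0', '\0', '\0', '\0', '\0', '\0']  # Создаем список из 8 нулевых символов
--
--     length = len(text) // 8  # Определяем длину строки, деленную на 8
--
--     for i in range(0, 9):
--         k = 0
--         for j in range(0, (length * i)):
--             k += ord(text[j]) * ord(text[j]) * j  # Вычисляем промежуточный результат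
--
--         k %= 1000
--         resultat = 0
--
--         while (k > 0):
--             resultat += k % 10 # Добавление последней цифры k к resultat
--             k //= 10
--
--         resultat += 60
--         output[i - 1] = chr(resultat)  # Преобразуем результат в символ и добавляем в список output
--
--     return ''.join(output)  # Возвращаем объединенную строку из списка output
-- ===== SOURCE B (Python) =====
-- def redactor(text):
--     # One forward prefix-sum pass over the padded text instead of 9 re-scans.
--     text += "#" * (-len(text) % 8)
--     s = [0]
--     acc = 0
--     for j, ch in enumerate(text):
--         acc += ord(ch) * ord(ch) * j
--         s.append(acc)
--     length = len(text) // 8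
--     out = []
--     for i in range(1, 9):
--         k = s[length * i] % 1000
--         d = k % 10 + k // 10 % 10 + k // 100  # digit sum, since k < 1000
--         out.append(chr(d + 60))
--     return ''.join(out)
-- ===== Notes on version B (the rewrite author's own statement) =====
-- stated objective: faster
-- what changed: Replaces A's nine re-scans of the padded text (the inner loop over range(length*i)) with a single prefix-sum pass, computes the padding length in closed form instead of a character-appending while loop, derives the 3-digit digit sum arithmetically (k<1000) instead of a while loop, and builds the 8 output chars directly for i=1..8 since A's i=0 write at index 7 is always overwritten by i=8.
import Mathlib
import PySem

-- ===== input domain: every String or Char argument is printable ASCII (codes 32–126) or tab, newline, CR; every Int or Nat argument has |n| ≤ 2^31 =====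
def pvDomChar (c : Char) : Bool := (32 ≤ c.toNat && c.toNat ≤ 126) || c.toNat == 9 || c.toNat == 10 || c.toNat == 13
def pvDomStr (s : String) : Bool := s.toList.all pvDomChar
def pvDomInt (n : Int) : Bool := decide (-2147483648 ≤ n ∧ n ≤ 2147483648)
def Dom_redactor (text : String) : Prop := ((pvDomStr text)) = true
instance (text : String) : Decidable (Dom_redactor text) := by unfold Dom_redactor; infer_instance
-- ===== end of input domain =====

-- B replaces A's nine quadratic re-scans with one prefix-sum pass and a closed-form
-- 3-digit sum (objective: faster, same exact output).

-- ===== PORT A =====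
-- while (len(text) % 8) != 0: text += "#"
-- (structural fuel: the loop appends at most 7 characters, so fuel 8 is exact)
def padGo : Nat → List Char → List Char
  | 0, t => t
  | f + 1, t => if t.length % 8 ≠ 0 then padGo f (t ++ ['#']) else t

def padA (t : List Char) : List Char := padGo 8 t

-- while k > 0: resultat += k % 10; k //= 10   (resultat accumulated)
-- (structural fuel: k // 10 < k when k > 0, so fuel k is exact)
def digitGo : Nat → Nat → Nat
  | 0, _ => 0
  | f + 1, k => if k > 0 then k % 10 + digitGo f (k / 10) else 0

def digitSumA (k : Nat) : Nat := digitGo k k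

def redactor (text : String) : String :=
  let t := padA text.toList
  let length := t.length / 8
  -- range(0,9) and range(0,length*i): nonnegative Python ranges, ported as List.range (exact);
  -- text[j] has j < length*i ≤ len(text), always in range, so getD is exact;
  -- output[i-1] with i = 0 is Python index -1, i.e. index 7: ported as 'if i = 0 then 7 else i - 1'.
  let output := (List.range 9).foldl (fun output i =>
      let k := (List.range (length * i)).foldl
          (fun k j => k + (t.getD j '\x00').toNat * (t.getD j '\x00').toNat * j) 0
      let k := k % 1000
      let resultat := digitSumA k
      let resultat := resultat + 60
      output.set (if i = 0 then 7 else i - 1) (Char.ofNat resultat))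
    ['\x00','\x00','\x00','\x00','\x00','\x00','\x00','\x00']
  String.mk output

-- ===== PORT B =====
-- for j, ch in enumerate(text): acc += ord(ch)*ord(ch)*j; s.append(acc)
def buildS : List Char → Nat → Nat → List Nat
  | [], _, _ => []
  | ch :: rest, j, acc =>
      let a := acc + ch.toNat * ch.toNat * j
      a :: buildS rest (j + 1) a

def redactor_alt (text : String) : String :=
  -- "#" * (-len(text) % 8) appended: (-n) % 8 = (8 - n % 8) % 8 in Python for n ≥ 0
  let t := text.toList ++ List.replicate ((8 - text.toList.length % 8) % 8) '#'
  let s := 0 :: buildS t 0 0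
  let length := t.length / 8
  -- range(1,9) ported as List.range' 1 8 (exact); s[length*i] in range, getD exact
  let out := (List.range' 1 8).foldl (fun out i =>
      let k := s.getD (length * i) 0 % 1000
      let d := k % 10 + k / 10 % 10 + k / 100
      out ++ [Char.ofNat (d + 60)]) []
  String.mk out

-- ===== PRECONDITION & SPEC =====
def Spec_redactor (text : String) (out : String) : Prop := out = redactor_alt text
instance (text : String) (out : String) : Decidable (Spec_redactor text out) := by unfold Spec_redactor; infer_instance

-- ===== CLAIM (what is proved, stated in full; the proofs are below) =====
def Claim_equal_redactor : Prop := ∀ (text : String), Dom_redactor text → Spec_redactor text (redactor text)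

-- ===== LEMMAS AND PROOFS =====

lemma padGo_eq (f : Nat) : ∀ (t : List Char), (8 - t.length % 8) % 8 ≤ f →
    padGo f t = t ++ List.replicate ((8 - t.length % 8) % 8) '#' := by
  induction f with
  | zero =>
      intro t h
      have h0 : t.length % 8 = 0 := by omega
      simp [padGo, h0]
  | succ f ih =>
      intro t h
      by_cases hne : t.length % 8 ≠ 0
      · rw [padGo, if_pos hne, ih (t ++ ['#']) (by simp only [List.length_append, List.length_cons, List.length_nil]; omega)]
        simp only [List.length_append, List.length_cons, List.length_nil, List.append_assoc,
          List.singleton_append]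
        rw [← List.replicate_succ]
        congr 2
        omega
      · rw [padGo, if_neg hne]
        have h0 : t.length % 8 = 0 := by omega
        simp [h0]

lemma pad_eq (t : List Char) : padA t = t ++ List.replicate ((8 - t.length % 8) % 8) '#' :=
  padGo_eq 8 t (by omega)

lemma digitGo_fuel (f : Nat) : ∀ (f' k : Nat), k ≤ f → k ≤ f' → digitGo f k = digitGo f' k := by
  induction f with
  | zero =>
      intro f' k h _
      have : k = 0 := by omega
      subst this
      cases f' <;> simp [digitGo]
  | succ f ih =>
      intro f' k h h'
      by_cases hk : k > 0
      · obtain ⟨f'', rfl⟩ : ∃ f'', f' = f'' + 1 := ⟨f' - 1, by omega⟩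
        have h1 : k / 10 ≤ f := by omega
        have h2 : k / 10 ≤ f'' := by omega
        rw [digitGo, digitGo, if_pos hk, if_pos hk, ih f'' (k / 10) h1 h2]
      · have : k = 0 := by omega
        subst this
        rw [digitGo, if_neg hk]
        cases f' with
        | zero => simp [digitGo]
        | succ f'' => rw [digitGo, if_neg hk]

lemma digitSumA_eq (k : Nat) :
    digitSumA k = if k > 0 then k % 10 + digitSumA (k / 10) else 0 := by
  by_cases hk : k > 0
  · rw [if_pos hk]
    show digitGo k k = _
    obtain ⟨k', rfl⟩ : ∃ k', k = k' + 1 := ⟨k - 1, by omega⟩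
    rw [digitGo, if_pos hk]
    congr 1
    exact digitGo_fuel k' _ _ (by omega) le_rfl
  · have : k = 0 := by omega
    subst this
    simp [digitSumA, digitGo]

lemma padA_len (t : List Char) : (padA t).length % 8 = 0 := by
  rw [pad_eq]
  simp only [List.length_append, List.length_replicate]
  omega

lemma buildS_getD (t : List Char) (j0 acc m : Nat) (hm : m ≤ t.length) :
    (acc :: buildS t j0 acc).getD m 0 =
      acc + ((List.range m).map
        (fun k => (t.getD k '\x00').toNat * (t.getD k '\x00').toNat * (j0 + k))).sum := by
  induction t generalizing j0 acc m with
  | nil =>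
      have : m = 0 := by simpa using hm
      subst this
      simp [buildS]
  | cons ch rest ih =>
      cases m with
      | zero => simp
      | succ m =>
          have hm' : m ≤ rest.length := by simpa using hm
          show (buildS (ch :: rest) j0 acc).getD m 0 = _
          rw [buildS]
          show ((acc + ch.toNat * ch.toNat * j0) :: buildS rest (j0 + 1) (acc + ch.toNat * ch.toNat * j0)).getD m 0 = _
          rw [ih _ _ _ hm']
          rw [List.range_succ_eq_map]
          simp only [List.map_cons, List.map_map, List.sum_cons, Function.comp_def,
            List.getD_cons_zero, List.getD_cons_succ, Nat.succ_eq_add_one]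
          have : ∀ k : Nat, j0 + 1 + k = j0 + (k + 1) := by omega
          simp only [this, Nat.add_assoc, Nat.add_zero]

lemma ds_small (k : Nat) (hk : k < 1000) :
    digitSumA k = k % 10 + k / 10 % 10 + k / 100 := by
  by_cases h0 : k = 0
  · subst h0; rw [digitSumA_eq]; simp
  · rw [digitSumA_eq, if_pos (by omega)]
    by_cases h1 : k / 10 = 0
    · rw [digitSumA_eq, if_neg (by omega)]; omega
    · rw [digitSumA_eq, if_pos (by omega)]
      by_cases h2 : k / 10 / 10 = 0
      · rw [digitSumA_eq, if_neg (by omega)]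
        have : k / 10 / 10 = k / 100 := by omega
        omega
      · rw [digitSumA_eq, if_pos (by omega)]
        rw [digitSumA_eq, if_neg (by omega)]
        have e1 : k / 10 / 10 = k / 100 := by omega
        have e2 : k / 100 < 10 := by omega
        have e3 : k / 10 / 10 / 10 = 0 := by omega
        omega

-- ===== VERDICT (by name: the statement is the Claim_ definition above) =====
lemma comp_eq (t : List Char) (m : Nat) (hm : m ≤ t.length) :
    Char.ofNat (digitSumA ((List.range m).foldl
        (fun k j => k + (t.getD j '\x00').toNat * (t.getD j '\x00').toNat * j) 0 % 1000) + 60) =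
    Char.ofNat ((0 :: buildS t 0 0).getD m 0 % 1000 % 10 +
      (0 :: buildS t 0 0).getD m 0 % 1000 / 10 % 10 +
      (0 :: buildS t 0 0).getD m 0 % 1000 / 100 + 60) := by
  have hfold : (List.range m).foldl
      (fun k j => k + (t.getD j '\x00').toNat * (t.getD j '\x00').toNat * j) 0 =
      (0 :: buildS t 0 0).getD m 0 := by
    rw [PySem.List.foldl_add_nat, buildS_getD t 0 0 m hm]
    simp
  rw [hfold, ds_small _ (Nat.mod_lt _ (by norm_num))]

-- ===== VERDICT (by name: the statement is the Claim_ definition above) =====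
theorem redactor_spec : Claim_equal_redactor := by
  intro text _
  unfold Spec_redactor
  show redactor text = redactor_alt text
  simp only [redactor, redactor_alt, ← pad_eq text.toList]
  have h9 : List.range 9 = [0,1,2,3,4,5,6,7,8] := rfl
  have h8 : List.range' 1 8 = [1,2,3,4,5,6,7,8] := rfl
  rw [h9, h8]
  set t := padA text.toList with ht
  have hlen : t.length % 8 = 0 := padA_len _
  have hle : ∀ i : Nat, i ≤ 8 → t.length / 8 * i ≤ t.length := by
    intro i hi
    have := Nat.div_mul_cancel (Nat.dvd_of_mod_eq_zero hlen)
    calc t.length / 8 * i ≤ t.length / 8 * 8 := Nat.mul_le_mul_left _ hi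
    _ = t.length := this
  simp only [List.foldl_cons, List.foldl_nil]
  rw [comp_eq t _ (hle 0 (by norm_num)), comp_eq t _ (hle 1 (by norm_num)),
      comp_eq t _ (hle 2 (by norm_num)), comp_eq t _ (hle 3 (by norm_num)),
      comp_eq t _ (hle 4 (by norm_num)), comp_eq t _ (hle 5 (by norm_num)),
      comp_eq t _ (hle 6 (by norm_num)), comp_eq t _ (hle 7 (by norm_num)),
      comp_eq t _ (hle 8 (by norm_num))]
  norm_num
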